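-- pv_equiv track=rewrite | github.com/Matematik411/AdventOfCode2024 | day14.py | find_long_connected_row
-- ===== SOURCE A (Python) =====
-- def find_long_connected_row(t, N):
--     for r in t:
--         if r.count("#") > N:
--             pos = [i for i, el in enumerate(r) if el == "#"]
--             diffs = [pos[i] - pos[i - 1] for i in range(len(pos) - 1)]
--
--             if diffs.count(1) > N:
--                 return True
--
--     return False
-- ===== SOURCE B (Python) =====
-- def find_long_connected_row(t, N):
--     for r in t:
--         pairs = 0
--         prev = False
--         for ch in r:
--             cur = ch == "#"
--             if prev and cur:
--                 pairs += 1
--             prev = cur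
--         if pairs > N:
--             return True
--     return False
-- ===== Notes on version B (the rewrite author's own statement) =====
-- stated objective: simpler
-- what changed: B replaces A's three-pass row analysis (count gate, positions list, diffs list, count of 1s) with a single streaming pass per row that keeps only a previous-char flag and a running adjacent-pair counter; the count gate is dropped as redundant.
-- intended difference: On inputs where some row's adjacent-'#' pair count exceeds N only when the pair ending at that row's last '#' is counted, A returns False (its diffs list is built with i starting at 0, so pos[i-1] wraps to pos[-1] and the last adjacent difference is replaced by the useless pos[0]-pos[-1]) while B returns True, which is the intended 'row with more than N adjacent # marks' answer. — e.g. on find_long_connected_row(["##"], 0): A returns false, B returns true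
import Mathlib
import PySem

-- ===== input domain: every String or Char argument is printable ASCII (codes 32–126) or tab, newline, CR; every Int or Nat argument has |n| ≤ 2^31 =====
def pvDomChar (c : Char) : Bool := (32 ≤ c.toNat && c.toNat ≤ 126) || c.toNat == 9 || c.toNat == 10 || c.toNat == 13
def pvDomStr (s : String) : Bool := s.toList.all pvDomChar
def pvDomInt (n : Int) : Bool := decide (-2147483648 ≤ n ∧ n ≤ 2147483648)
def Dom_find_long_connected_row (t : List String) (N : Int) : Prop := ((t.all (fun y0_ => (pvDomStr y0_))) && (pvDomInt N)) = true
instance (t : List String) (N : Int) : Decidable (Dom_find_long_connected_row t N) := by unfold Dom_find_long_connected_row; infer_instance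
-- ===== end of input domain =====

-- B is a single streaming pass per row counting adjacent '#' pairs (simpler); A's diffs list starts at pos[0]-pos[-1]
-- (negative-index wraparound), so A misses the adjacent pair that ends at a row's last '#' — see D_ below.

-- ===== PORT A =====
def find_long_connected_row (t : List String) (N : Int) : Bool :=
  match t with
  | [] => false
  | r :: rest =>
    if ((PySem.Str.count r "#" : Nat) : Int) > N then
      let pos : List Int := ((PySem.List.enumerate r.toList 0).filter (fun p => p.2 == '#')).map (fun p => p.1)
      let diffs : List Int := (PySem.List.pyRange 0 ((pos.length : Int) - 1) 1).map
        (fun i => PySem.List.pyGetD pos i 0 - PySem.List.pyGetD pos (i - 1) 0)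
      -- pyGetD with default 0 is exact: every index used is in Python's range (i-1 = -1 wraps to the last element)
      if ((diffs.count 1 : Nat) : Int) > N then true
      else find_long_connected_row rest N
    else find_long_connected_row rest N

-- ===== PORT B =====
def pvRowPairs : List Char → Nat → Bool → Nat
  | [], pairs, _ => pairs
  | c :: cs, pairs, prev =>
    let cur := c == '#'
    pvRowPairs cs (if prev && cur then pairs + 1 else pairs) cur

def find_long_connected_row_alt (t : List String) (N : Int) : Bool :=
  match t with
  | [] => false
  | r :: rest =>
    if ((pvRowPairs r.toList 0 false : Nat) : Int) > N then true
    else find_long_connected_row_alt rest N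

-- ===== PRECONDITION & SPEC =====
-- spec-level helper for D_ (used by no port): "l has more than N adjacent '#' pairs"
def pvMiss (N : Int) (l : List Char) : Prop :=
  N < (l.zip l.tail).count ('#', '#')

-- On inputs where some row's adjacent-'#' pair count exceeds N only if the pair ending at that row's last '#'
-- is included, A returns False (its diffs list is built from pos[i]-pos[i-1] with i starting at 0, so Python's
-- negative indexing replaces the last adjacent difference by pos[0]-pos[-1]) while B returns True, which is the
-- intended "row with more than N adjacent '#' pairs" test.
def D_find_long_connected_row (t : List String) (N : Int) : Prop :=
  (∃ r ∈ t, pvMiss N r.toList) ∧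
    ∀ r ∈ t, ¬ pvMiss N (r.toList.reverse.dropWhile (· != '#')).tail
instance (t : List String) (N : Int) : Decidable (D_find_long_connected_row t N) := by
  unfold D_find_long_connected_row pvMiss; infer_instance

def Spec_find_long_connected_row (t : List String) (N : Int) (out : Bool) : Prop :=
  ¬ D_find_long_connected_row t N → out = find_long_connected_row_alt t N
instance (t : List String) (N : Int) (out : Bool) : Decidable (Spec_find_long_connected_row t N out) := by
  unfold Spec_find_long_connected_row; infer_instance

def pvDiffWitness_find_long_connected_row : List String × Int := (["##"], 0)
def pvDiffWitnessOut_find_long_connected_row : Bool × Bool := (false, true)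

-- ===== CLAIM (what is proved, stated in full; the proofs are below) =====
def Claim_unchanged_find_long_connected_row : Prop := ∀ (t : List String) (N : Int), Dom_find_long_connected_row t N → Spec_find_long_connected_row t N (find_long_connected_row t N)
def Claim_changed_find_long_connected_row : Prop := Dom_find_long_connected_row (pvDiffWitness_find_long_connected_row.1) (pvDiffWitness_find_long_connected_row.2) ∧ D_find_long_connected_row (pvDiffWitness_find_long_connected_row.1) (pvDiffWitness_find_long_connected_row.2) ∧ find_long_connected_row (pvDiffWitness_find_long_connected_row.1) (pvDiffWitness_find_long_connected_row.2) = pvDiffWitnessOut_find_long_connected_row.1 ∧ find_long_connected_row_alt (pvDiffWitness_find_long_connected_row.1) (pvDiffWitness_find_long_connected_row.2) = pvDiffWitnessOut_find_long_connected_row.2 ∧ pvDiffWitnessOut_find_long_connected_row.1 ≠ pvDiffWitnessOut_find_long_connected_row.2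
def Claim_exact_find_long_connected_row : Prop := ∀ (t : List String) (N : Int), Dom_find_long_connected_row t N → D_find_long_connected_row t N → find_long_connected_row t N ≠ find_long_connected_row_alt t N

-- ===== LEMMAS AND PROOFS =====

-- proof-side helpers
def pvHashPairs (l : List Char) : Nat :=
  (l.zip l.tail).countP fun p => p.1 == '#' && p.2 == '#'

def pvAdjPairs : List Char → Nat
  | c1 :: c2 :: rest => (if c1 = '#' ∧ c2 = '#' then 1 else 0) + pvAdjPairs (c2 :: rest)
  | _ => 0

def pvAdjPairsTrunc : List Char → Nat
  | c1 :: c2 :: rest => (if c1 = '#' ∧ c2 = '#' ∧ '#' ∈ rest then 1 else 0) + pvAdjPairsTrunc (c2 :: rest)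
  | _ => 0

def pvPosFrom (i : Int) : List Char → List Int
  | [] => []
  | c :: cs => if c = '#' then i :: pvPosFrom (i + 1) cs else pvPosFrom (i + 1) cs

def pvZdiffs : List Int → List Int
  | a :: b :: q => (b - a) :: pvZdiffs (b :: q)
  | _ => []

def pvAdjOnes (q : List Int) : Nat := (pvZdiffs q).count 1

def pvAdjPairsP : Bool → List Char → Nat
  | _, [] => 0
  | prev, c :: cs => (if prev ∧ c = '#' then 1 else 0) + pvAdjPairsP (c == '#') cs

lemma pvAdjPairsP_cons (cs : List Char) : ∀ (c : Char), pvAdjPairsP (c == '#') cs = pvAdjPairs (c :: cs) := by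
  induction cs with
  | nil => intro c; simp [pvAdjPairsP, pvAdjPairs]
  | cons c2 r ih =>
    intro c
    simp only [pvAdjPairsP, pvAdjPairs, ih c2]
    by_cases h : c = '#' <;> simp [h]

lemma pvRowPairs_eq (l : List Char) : ∀ (p : Nat) (prev : Bool),
    pvRowPairs l p prev = p + pvAdjPairsP prev l := by
  induction l with
  | nil => intro p prev; simp [pvRowPairs, pvAdjPairsP]
  | cons c cs ih =>
    intro p prev
    simp only [pvRowPairs, pvAdjPairsP, ih]
    by_cases h : c = '#' <;> by_cases hp : prev = true <;>
      simp [h, hp] <;> omega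

lemma pvAdjPairsP_false (l : List Char) : pvAdjPairsP false l = pvAdjPairs l := by
  cases l with
  | nil => rfl
  | cons c cs => simp [pvAdjPairsP, pvAdjPairsP_cons, pvAdjPairs]

lemma pvPosFrom_ge (l : List Char) : ∀ (i : Int), ∀ x ∈ pvPosFrom i l, i ≤ x := by
  induction l with
  | nil => intro i x hx; simp [pvPosFrom] at hx
  | cons c cs ih =>
    intro i x hx
    simp only [pvPosFrom] at hx
    split at hx
    · rcases List.mem_cons.mp hx with h | h
      · omega
      · have := ih (i+1) x h; omega
    · have := ih (i+1) x hx; omega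

lemma pvPosFrom_nil_iff (l : List Char) (i : Int) : pvPosFrom i l = [] ↔ '#' ∉ l := by
  induction l generalizing i with
  | nil => simp [pvPosFrom]
  | cons c cs ih =>
    simp only [pvPosFrom, List.mem_cons]
    split <;> rename_i h
    · simp [h]
    · simpa [ih] using fun _ hh => h hh.symm

lemma pvPosFrom_pairwise (l : List Char) : ∀ (i : Int), (pvPosFrom i l).Pairwise (· < ·) := by
  induction l with
  | nil => intro i; simp [pvPosFrom]
  | cons c cs ih =>
    intro i
    simp only [pvPosFrom]
    split
    · exact List.Pairwise.cons (fun x hx => by have := pvPosFrom_ge cs (i+1) x hx; omega) (ih (i+1))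
    · exact ih (i+1)

lemma pvEnumFilter (l : List Char) : ∀ (s : Int),
    ((PySem.List.enumerate l s).filter (fun p => p.2 == '#')).map (fun p => p.1) = pvPosFrom s l := by
  induction l with
  | nil => intro s; simp [PySem.List.enumerate_nil, pvPosFrom]
  | cons c cs ih =>
    intro s
    rw [PySem.List.enumerate_cons]
    simp only [pvPosFrom, List.filter_cons]
    by_cases h : c = '#' <;> simp [h, ih]

lemma pvCountGo (fuel : Nat) : ∀ (l : List Char) (acc : Nat), l.length ≤ fuel →
    PySem.Chars.count.go ['#'] fuel l acc = acc + l.count '#' := by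
  induction fuel with
  | zero =>
    intro l acc h
    have : l = [] := List.eq_nil_of_length_eq_zero (by omega)
    subst this
    simp [PySem.Chars.count.go]
  | succ n ih =>
    intro l acc h
    cases l with
    | nil => simp [PySem.Chars.count.go]
    | cons c cs =>
      simp only [PySem.Chars.count.go, List.isPrefixOf, List.count_cons]
      by_cases hc : c = '#'
      · simp only [hc]
        simp [ih cs (acc+1) (by simp at h; omega)]
        omega
      · have hb : ('#' == c) = false := by simp [Ne.symm hc]
        simp only [hb, Bool.false_and, if_neg Bool.false_ne_true]
        rw [ih cs acc (by simp at h; omega)]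
        simp [hb, hc]

lemma pvStrCount (r : String) : PySem.Str.count r "#" = r.toList.count '#' := by
  have h : ("#" : String).toList = ['#'] := rfl
  rw [PySem.Str.count_eq, h]
  simp only [PySem.Chars.count]
  rw [if_neg (by simp)]
  exact (pvCountGo r.toList.length r.toList 0 le_rfl).trans (by omega)

lemma pvZdiffs_length (q : List Int) : (pvZdiffs q).length = q.length - 1 := by
  induction q with
  | nil => simp [pvZdiffs]
  | cons a q ih =>
    cases q with
    | nil => simp [pvZdiffs]
    | cons b r => simp [pvZdiffs] at ih ⊢; omega

lemma pvZdiffs_getElem (q : List Int) : ∀ (k : Nat) (h : k + 1 < q.length),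
    (pvZdiffs q)[k]'(by rw [pvZdiffs_length]; omega) = q[k + 1] - q[k] := by
  induction q with
  | nil => intro k h; simp at h
  | cons a q ih =>
    intro k h
    cases q with
    | nil => simp at h
    | cons b r =>
      cases k with
      | zero => simp [pvZdiffs]
      | succ m =>
        simp only [pvZdiffs]
        rw [List.getElem_cons_succ]
        simpa using ih m (by simp at h ⊢; omega)

-- A's diffs list counts 1s exactly as pvAdjOnes of pos.dropLast (the wrap-around first entry is never 1)
lemma pvDiffsCount (p : List Int) (hp : p.Pairwise (· < ·)) :
    ((PySem.List.pyRange 0 ((p.length : Int) - 1) 1).map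
      (fun i => PySem.List.pyGetD p i 0 - PySem.List.pyGetD p (i - 1) 0)).count 1
      = pvAdjOnes p.dropLast := by
  match p, hp with
  | [], _ => rw [PySem.List.pyRange_one_eq_nil (by simp)]; rfl
  | [a], _ => rw [PySem.List.pyRange_one_eq_nil (by simp)]; rfl
  | a :: b :: q, hp =>
    have hne : a :: b :: q ≠ [] := by simp
    have hlt : (0:Int) < (((a :: b :: q).length : Int) - 1) := by
      simp only [List.length_cons]; push_cast; omega
    rw [PySem.List.pyRange_one_cons hlt, List.map_cons]
    have hhead : PySem.List.pyGetD (a :: b :: q) 0 0 - PySem.List.pyGetD (a :: b :: q) (0 - 1) 0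
        = a - (a :: b :: q).getLast hne := by
      rw [PySem.List.pyGetD_zero_cons]
      norm_num [PySem.List.pyGetD_neg_one _ _ hne]
    have htail : (PySem.List.pyRange (0 + 1) (((a :: b :: q).length : Int) - 1) 1).map
        (fun i => PySem.List.pyGetD (a :: b :: q) i 0 - PySem.List.pyGetD (a :: b :: q) (i - 1) 0)
        = pvZdiffs (a :: b :: q).dropLast := by
      apply List.ext_getElem
      · simp [PySem.List.length_pyRange_one, pvZdiffs_length]
      · intro k h1 h2
        rw [List.getElem_map, PySem.List.getElem_pyRange_one]
        have hk : k < q.length := by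
          simp [PySem.List.length_pyRange_one] at h1; omega
        have c1 : (0 + 1 + (k:Int)) = ((k+1 : Nat) : Int) := by push_cast; ring
        have c2 : (0 + 1 + (k:Int)) - 1 = ((k : Nat) : Int) := by push_cast; ring
        rw [c1]
        have c2' : ((((k+1 : Nat) : Int)) - 1) = ((k : Nat) : Int) := by push_cast; ring
        rw [c2', PySem.List.pyGetD_natCast, PySem.List.pyGetD_natCast]
        rw [List.getD_eq_getElem _ _ (by simp; omega), List.getD_eq_getElem _ _ (by simp; omega)]
        rw [pvZdiffs_getElem _ k (by simp; omega)]
        simp only [List.getElem_dropLast]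
    rw [htail, hhead, List.count_cons]
    have hglast : a < (a :: b :: q).getLast hne := by
      have h1 : (a :: b :: q).getLast hne = (b :: q).getLast (by simp) :=
        List.getLast_cons (by simp)
      have h2 : (b :: q).getLast (by simp) ∈ b :: q := List.getLast_mem _
      have h3 : a < (b :: q).getLast (by simp) := (List.pairwise_cons.mp hp).1 _ h2
      rw [h1]; exact h3
    have hne1 : ((a - (a :: b :: q).getLast hne) == (1:Int)) = false := by
      simp only [beq_eq_false_iff_ne, ne_eq]
      omega
    rw [hne1]
    simp [pvAdjOnes]

lemma pvAdjOnes_posFrom_dropLast (l : List Char) : ∀ (i : Int),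
    pvAdjOnes (pvPosFrom i l).dropLast = pvAdjPairsTrunc l := by
  have adj1 : ∀ (x : Int) (z : List Int), pvAdjOnes (x :: (x+1) :: z) = 1 + pvAdjOnes ((x+1) :: z) := by
    intro x z; simp [pvAdjOnes, pvZdiffs, List.count_cons]; omega
  have adj2 : ∀ (x h0 : Int) (z : List Int), x + 2 ≤ h0 → pvAdjOnes (x :: h0 :: z) = pvAdjOnes (h0 :: z) := by
    intro x h0 z hge
    have : ((h0 - x) == (1:Int)) = false := by simp; omega
    simp [pvAdjOnes, pvZdiffs, List.count_cons, this]
  induction l with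
  | nil => intro i; rfl
  | cons c cs ih =>
    intro i
    cases cs with
    | nil => by_cases h : c = '#' <;> simp [pvPosFrom, h, pvAdjOnes, pvZdiffs, pvAdjPairsTrunc]
    | cons c2 r =>
      by_cases h : c = '#'
      · by_cases h2 : c2 = '#'
        · have e : pvPosFrom i (c :: c2 :: r) = i :: (i+1) :: pvPosFrom (i+1+1) r := by
            simp [pvPosFrom, h, h2]
          have e2 : (i+1) :: pvPosFrom (i+1+1) r = pvPosFrom (i+1) (c2 :: r) := by
            simp [pvPosFrom, h2]
          rw [e]
          cases hz : pvPosFrom (i+1+1) r with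
          | nil =>
            have hnm : '#' ∉ r := (pvPosFrom_nil_iff r (i+1+1)).mp hz
            have := ih (i+1)
            rw [← e2, hz] at this
            rw [h2] at this
            simp only [List.dropLast_cons₂, List.dropLast_singleton]
            simpa [pvAdjOnes, pvZdiffs, pvAdjPairsTrunc, h, h2, hnm] using this
          | cons h0 z2 =>
            have hnm : '#' ∈ r := by
              by_contra hc
              rw [(pvPosFrom_nil_iff r (i+1+1)).mpr hc] at hz; exact absurd hz (by simp)
            rw [hz] at e2
            have hd : ((i:Int) :: (i + 1) :: h0 :: z2).dropLast = i :: (i+1) :: (h0 :: z2).dropLast := by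
              simp
            rw [hd, adj1]
            have hth : ((i:Int) + 1) :: (h0 :: z2).dropLast = ((i+1) :: h0 :: z2).dropLast := by simp
            rw [hth, e2, ih (i+1)]
            simp [pvAdjPairsTrunc, h, h2, hnm]
        · have e : pvPosFrom i (c :: c2 :: r) = i :: pvPosFrom (i+1+1) r := by
            simp [pvPosFrom, h, h2]
          have e2 : pvPosFrom (i+1+1) r = pvPosFrom (i+1) (c2 :: r) := by
            simp [pvPosFrom, h2]
          rw [e]
          cases hz : pvPosFrom (i+1+1) r with
          | nil =>
            have := ih (i+1)
            rw [← e2, hz] at this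
            simp [pvAdjOnes, pvZdiffs, pvAdjPairsTrunc, h2, ← this]
          | cons h0 z2 =>
            have hdc : (i :: h0 :: z2).dropLast = i :: (h0 :: z2).dropLast := by simp
            rw [hdc]
            have step : pvAdjOnes (i :: (h0 :: z2).dropLast) = pvAdjOnes ((h0 :: z2).dropLast) := by
              cases hzz : (h0 :: z2).dropLast with
              | nil => simp [pvAdjOnes, pvZdiffs]
              | cons y w =>
                have hy : y ∈ h0 :: z2 := by
                  have : y ∈ (h0 :: z2).dropLast := by rw [hzz]; simp
                  exact List.dropLast_subset _ this
                have hge : i + 1 + 1 ≤ y :=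
                  pvPosFrom_ge r (i+1+1) y (by rw [hz]; exact hy)
                exact adj2 _ _ _ (by omega)
            rw [step, ← hz, e2, ih (i+1)]
            simp [pvAdjPairsTrunc, h2]
      · have e : pvPosFrom i (c :: c2 :: r) = pvPosFrom (i+1) (c2 :: r) := by
          simp [pvPosFrom, h]
        rw [e, ih (i+1)]
        simp [pvAdjPairsTrunc, h]

lemma pvAdjPairs_le (l : List Char) : pvAdjPairs l ≤ l.count '#' - 1 := by
  induction l with
  | nil => simp [pvAdjPairs]
  | cons c cs ih =>
    cases cs with
    | nil => simp [pvAdjPairs]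
    | cons c2 r =>
      simp only [pvAdjPairs, List.count_cons, beq_iff_eq] at ih ⊢
      split_ifs at ih ⊢ <;> simp_all <;> omega

lemma pvTrunc_le (l : List Char) : pvAdjPairsTrunc l ≤ pvAdjPairs l := by
  induction l with
  | nil => simp [pvAdjPairsTrunc, pvAdjPairs]
  | cons c cs ih =>
    cases cs with
    | nil => simp [pvAdjPairsTrunc, pvAdjPairs]
    | cons c2 r =>
      simp only [pvAdjPairsTrunc, pvAdjPairs]
      have := ih
      split <;> split <;> simp_all <;> omega

lemma pvHashPairs_eq (l : List Char) : pvHashPairs l = pvAdjPairs l := by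
  cases l with
  | nil => rfl
  | cons c cs =>
    induction cs generalizing c with
    | nil => rfl
    | cons c2 r ih =>
      simp only [pvHashPairs, pvAdjPairs, List.tail_cons, List.zip_cons_cons, List.countP_cons] at ih ⊢
      rw [← ih c2]
      by_cases h : c = '#' <;> by_cases h2 : c2 = '#' <;> simp [h, h2] <;> omega

lemma pvAdjPairs_concat (m : List Char) (x : Char) :
    pvAdjPairs (m ++ [x]) = pvAdjPairs m + (if m.getLast? = some '#' ∧ x = '#' then 1 else 0) := by
  cases m with
  | nil => simp [pvAdjPairs]
  | cons c cs =>
    induction cs generalizing c with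
    | nil => by_cases h : c = '#' <;> by_cases hx : x = '#' <;> simp [pvAdjPairs, h, hx]
    | cons c2 r ih =>
      simp only [List.cons_append, pvAdjPairs] at ih ⊢
      rw [ih c2]
      simp [List.getLast?_cons_cons]
      omega

lemma pvAdjPairsTrunc_zero (cs : List Char) : ∀ (c : Char), '#' ∉ cs → pvAdjPairsTrunc (c :: cs) = 0 := by
  induction cs with
  | nil => intro c _; rfl
  | cons c2 r ih =>
    intro c h
    have h2 : ¬ c2 = '#' := fun hh => h (by simp [hh])
    have hr : '#' ∉ r := fun hh => h (by simp [hh])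
    simp [pvAdjPairsTrunc, h2, ih c2 hr]

lemma pvHashPairs_trunc (l : List Char) :
    pvHashPairs ((l.reverse.dropWhile fun c => c != '#').tail) = pvAdjPairsTrunc l := by
  induction l with
  | nil => rfl
  | cons c cs ih =>
    by_cases hm : '#' ∈ cs
    · have hnn : cs.reverse.dropWhile (fun c => c != '#') ≠ [] := by
        intro hnil
        have := List.dropWhile_eq_nil_iff.mp hnil '#' (by simpa using hm)
        simp at this
      obtain ⟨h0, w, hw⟩ := List.exists_cons_of_ne_nil hnn
      have hsplit : (c :: cs).reverse.dropWhile (fun c => c != '#')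
          = cs.reverse.dropWhile (fun c => c != '#') ++ [c] := by
        rw [List.reverse_cons, List.dropWhile_append, if_neg (by simp [hnn])]
      cases cs with
      | nil => simp at hm
      | cons c2 r =>
        have hlast : ((c2 :: r).reverse.dropWhile fun c => c != '#').getLast? = some c2 := by
          have hsuf : ((c2 :: r).reverse.dropWhile fun c => c != '#') <:+ (c2 :: r).reverse :=
            List.dropWhile_suffix _
          obtain ⟨pre, hpre⟩ := hsuf
          have : (pre ++ ((c2 :: r).reverse.dropWhile fun c => c != '#')).getLast? = some c2 := by
            rw [hpre, List.reverse_cons]; simp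
          rwa [List.getLast?_append_of_ne_nil _ hnn] at this
        rw [hsplit, hw, List.cons_append, List.tail_cons,
          pvHashPairs_eq, pvAdjPairs_concat, ← pvHashPairs_eq]
        rw [hw, List.tail_cons] at ih
        rw [ih]
        cases hwc : w with
        | nil =>
          have hnr : '#' ∉ r := by
            intro hr
            -- '#' ∈ r means the dropWhile of (c2::r).reverse keeps at least two elements (a '#' from r and c2 behind it)
            have hmem : '#' ∈ r.reverse := by simpa using hr
            have hnn2 : r.reverse.dropWhile (fun c => c != '#') ≠ [] := by
              intro hnil
              have := List.dropWhile_eq_nil_iff.mp hnil '#' hmem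
              simp at this
            obtain ⟨g0, gw, hg⟩ := List.exists_cons_of_ne_nil hnn2
            have : (c2 :: r).reverse.dropWhile (fun c => c != '#')
                = r.reverse.dropWhile (fun c => c != '#') ++ [c2] := by
              rw [List.reverse_cons, List.dropWhile_append, if_neg (by simp [hnn2])]
            rw [this, hg] at hw
            rw [hwc] at hw
            simp at hw
          have : pvAdjPairsTrunc (c :: c2 :: r)
              = 0 + pvAdjPairsTrunc (c2 :: r) := by
            simp [pvAdjPairsTrunc, hnr]
          rw [this]
          simp [pvAdjPairsTrunc]
        | cons y ys =>
          have hgl : (y :: ys).getLast? = some c2 := by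
            rw [hw, hwc] at hlast
            rwa [List.getLast?_cons_cons] at hlast
          rw [hgl]
          have hr : '#' ∈ r := by
            by_contra hnr
            have : (c2 :: r).reverse.dropWhile (fun c => c != '#')
                = List.dropWhile (fun c => c != '#') (r.reverse ++ [c2]) := by
              rw [List.reverse_cons]
            have hall : r.reverse.dropWhile (fun c => c != '#') = [] :=
              List.dropWhile_eq_nil_iff.mpr (fun x hx => by
                simp only [bne_iff_ne, ne_eq, decide_eq_true_eq]
                intro hxx; exact hnr (by simpa [hxx] using hx))
            rw [this, List.dropWhile_append, if_pos (by simp [hall])] at hw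
            by_cases hc2 : c2 = '#'
            · rw [hwc] at hw
              simp [List.dropWhile_cons, hc2] at hw
            · simp [List.dropWhile_cons, hc2] at hw
          by_cases hc2 : c2 = '#' <;> by_cases hc : c = '#' <;>
            simp [pvAdjPairsTrunc, hc, hc2, hr] <;> omega
    · have hall : cs.reverse.dropWhile (fun c => c != '#') = [] :=
        List.dropWhile_eq_nil_iff.mpr (fun x hx => by
          simp only [bne_iff_ne, ne_eq, decide_eq_true_eq]
          intro hxx; exact hm (by simpa [hxx] using hx))
      have hstep : (c :: cs).reverse.dropWhile (fun c => c != '#')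
          = List.dropWhile (fun c => c != '#') [c] := by
        rw [List.reverse_cons, List.dropWhile_append, if_pos (by simp [hall])]
      cases cs with
      | nil =>
        by_cases hc : c = '#' <;>
          simp [hstep, List.dropWhile_cons, hc, pvHashPairs, pvAdjPairsTrunc]
      | cons c2 r =>
        rw [hstep]
        rw [pvAdjPairsTrunc_zero _ c hm]
        by_cases hc : c = '#' <;> simp [List.dropWhile_cons, hc, pvHashPairs]

lemma pvCount_pairs (l : List Char) : (l.zip l.tail).count ('#', '#') = pvHashPairs l := by
  rw [pvHashPairs, List.count_eq_countP]
  apply List.countP_congr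
  intro p _
  cases p with
  | mk a b =>
    by_cases ha : a = '#' <;> by_cases hb : b = '#' <;> simp [ha, hb, Prod.ext_iff]

lemma D_iff (t : List String) (N : Int) :
    D_find_long_connected_row t N ↔
      ((∃ r ∈ t, N < (pvAdjPairs r.toList : Int)) ∧ (∀ r ∈ t, (pvAdjPairsTrunc r.toList : Int) ≤ N)) := by
  unfold D_find_long_connected_row pvMiss
  simp only [pvCount_pairs]
  simp only [pvHashPairs_trunc]
  simp only [pvHashPairs_eq]
  constructor
  · rintro ⟨⟨r, hr, h1⟩, h2⟩
    exact ⟨⟨r, hr, h1⟩, fun r hr => by have := h2 r hr; omega⟩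
  · rintro ⟨⟨r, hr, h1⟩, h2⟩
    exact ⟨⟨r, hr, h1⟩, fun r hr => by have := h2 r hr; omega⟩

lemma A_true_iff (t : List String) (N : Int) :
    find_long_connected_row t N = true ↔ ∃ r ∈ t, N < (pvAdjPairsTrunc r.toList : Int) := by
  induction t with
  | nil => simp [find_long_connected_row]
  | cons r rest ih =>
    have hrow : find_long_connected_row (r :: rest) N
        = (decide (N < (pvAdjPairsTrunc r.toList : Int)) || find_long_connected_row rest N) := by
      simp only [find_long_connected_row, pvStrCount, pvEnumFilter]
      rw [pvDiffsCount _ (pvPosFrom_pairwise r.toList 0), pvAdjOnes_posFrom_dropLast]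
      by_cases hg : ((r.toList.count '#' : Nat) : Int) > N
      · rw [if_pos hg]
        by_cases hd : ((pvAdjPairsTrunc r.toList : Nat) : Int) > N
        · simp [hd]
        · simp [hd]
      · rw [if_neg hg]
        have t1 := pvTrunc_le r.toList
        have t2 := pvAdjPairs_le r.toList
        have hnd : ¬ (N < (pvAdjPairsTrunc r.toList : Int)) := by omega
        simp [hnd]
    rw [hrow]
    simp only [Bool.or_eq_true, decide_eq_true_eq, ih]
    constructor
    · rintro (h | ⟨x, hx, hh⟩)
      · exact ⟨r, by simp, h⟩
      · exact ⟨x, by simp [hx], hh⟩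
    · rintro ⟨x, hx, hh⟩
      rcases List.mem_cons.mp hx with rfl | hx'
      · exact Or.inl hh
      · exact Or.inr ⟨x, hx', hh⟩

lemma B_true_iff (t : List String) (N : Int) :
    find_long_connected_row_alt t N = true ↔ ∃ r ∈ t, N < (pvAdjPairs r.toList : Int) := by
  induction t with
  | nil => simp [find_long_connected_row_alt]
  | cons r rest ih =>
    have hrow : find_long_connected_row_alt (r :: rest) N
        = (decide (N < (pvAdjPairs r.toList : Int)) || find_long_connected_row_alt rest N) := by
      simp only [find_long_connected_row_alt, pvRowPairs_eq, pvAdjPairsP_false]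
      by_cases hd : ((pvAdjPairs r.toList : Nat) : Int) > N
      · simp [hd]
      · simp [hd]
    rw [hrow]
    simp only [Bool.or_eq_true, decide_eq_true_eq, ih]
    constructor
    · rintro (h | ⟨x, hx, hh⟩)
      · exact ⟨r, by simp, h⟩
      · exact ⟨x, by simp [hx], hh⟩
    · rintro ⟨x, hx, hh⟩
      rcases List.mem_cons.mp hx with rfl | hx'
      · exact Or.inl hh
      · exact Or.inr ⟨x, hx', hh⟩

-- ===== VERDICT (by name: the statement is the Claim_ definition above) =====
theorem find_long_connected_row_spec : Claim_unchanged_find_long_connected_row := by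
  intro t N _
  intro hD
  cases hA : find_long_connected_row t N with
  | true =>
    obtain ⟨r, hr, hlt⟩ := (A_true_iff t N).mp hA
    have ht := pvTrunc_le r.toList
    exact ((B_true_iff t N).mpr ⟨r, hr, by omega⟩).symm
  | false =>
    cases hB : find_long_connected_row_alt t N with
    | false => rfl
    | true =>
      exfalso
      apply hD
      rw [D_iff]
      refine ⟨(B_true_iff t N).mp hB, ?_⟩
      intro r hr
      by_contra hc
      have : find_long_connected_row t N = true := (A_true_iff t N).mpr ⟨r, hr, by omega⟩
      rw [hA] at this
      exact Bool.false_ne_true this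

theorem find_long_connected_row_changed : Claim_changed_find_long_connected_row := by
  unfold Claim_changed_find_long_connected_row; decide

theorem find_long_connected_row_tight : Claim_exact_find_long_connected_row := by
  intro t N _ hD
  obtain ⟨⟨r, hr, hall⟩, htr⟩ := (D_iff t N).mp hD
  have hB : find_long_connected_row_alt t N = true := (B_true_iff t N).mpr ⟨r, hr, hall⟩
  have hA : find_long_connected_row t N = false := by
    cases hAe : find_long_connected_row t N with
    | false => rfl
    | true =>
      obtain ⟨r', hr', h'⟩ := (A_true_iff t N).mp hAe
      have := htr r' hr'
      omega
  rw [hA, hB]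
  exact Bool.false_ne_true
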